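-- pv_equiv track=rewrite | github.com/xile42/leetcode | python3/1826. 有缺陷的传感器.py | badSensor
-- ===== SOURCE A (Python) =====
-- from typing import List
--
-- def badSensor(sensor1: List[int], sensor2: List[int]) -> int:
--
--     n = len(sensor1)
--     valid = set()
--     for i in range(n):
--         if sensor1[:i] == sensor2[:i] and sensor1[i:-1] == sensor2[i + 1:] and sensor1[-1] != sensor2[i]:
--             valid.add(1)
--         if sensor1[:i] == sensor2[:i] and sensor2[i:-1] == sensor1[i + 1:] and sensor2[-1] != sensor1[i]:
--             valid.add(2)
--
--     if len(valid) == 1: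
--         return list(valid)[0]
--
--     return -1
-- ===== SOURCE B (Python) =====
-- from typing import List
--
-- def badSensor(sensor1: List[int], sensor2: List[int]) -> int:
--     # O(n): find the first index where the two streams disagree, then check
--     # once, for each sensor, whether its tail is the other stream shifted by one.
--     n = len(sensor1)
--     if len(sensor2) != n:
--         return -1
--     f = 0
--     while f < n and sensor1[f] == sensor2[f]:
--         f += 1
--     if f == n:
--         return -1
--     one = sensor1[f:n - 1] == sensor2[f + 1:] and sensor1[-1] != sensor2[f]
--     two = sensor2[f:n - 1] == sensor1[f + 1:] and sensor2[-1] != sensor1[f]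
--     if one != two:
--         return 1 if one else 2
--     return -1
-- ===== Notes on version B (the rewrite author's own statement) =====
-- stated objective: faster
-- what changed: Instead of testing every index i with fresh list slices (quadratic), B locates the single first mismatch index with one linear scan and then checks each sensor's shifted-suffix condition exactly once at that index.
import Mathlib
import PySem

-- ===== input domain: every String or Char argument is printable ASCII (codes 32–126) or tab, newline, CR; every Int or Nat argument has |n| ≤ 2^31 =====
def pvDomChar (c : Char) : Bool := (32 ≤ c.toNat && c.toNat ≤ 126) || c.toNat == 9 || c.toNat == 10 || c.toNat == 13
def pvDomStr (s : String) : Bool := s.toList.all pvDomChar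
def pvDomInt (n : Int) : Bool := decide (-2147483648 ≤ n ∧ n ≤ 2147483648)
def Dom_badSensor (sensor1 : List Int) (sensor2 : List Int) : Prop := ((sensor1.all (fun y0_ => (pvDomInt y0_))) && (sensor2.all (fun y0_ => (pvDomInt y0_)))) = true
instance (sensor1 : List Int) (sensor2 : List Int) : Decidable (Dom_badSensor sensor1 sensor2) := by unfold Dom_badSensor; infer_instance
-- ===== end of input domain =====

-- B replaces A's quadratic scan over all drop positions by one linear scan for the
-- first mismatch index followed by a single shifted-suffix check per sensor.


-- ===== PORT A =====
-- sensor1[:i] == sensor2[:i] and sensor1[i:-1] == sensor2[i+1:] and sensor1[-1] != sensor2[i]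
def condA1 (sensor1 : List Int) (sensor2 : List Int) (i : Int) : Bool :=
  decide (PySem.List.slice sensor1 none (some i) = PySem.List.slice sensor2 none (some i) ∧
    PySem.List.slice sensor1 (some i) (some (-1)) = PySem.List.slice sensor2 (some (i + 1)) none ∧
    PySem.List.pyGetD sensor1 (-1) 0 ≠ PySem.List.pyGetD sensor2 i 0)

-- sensor1[:i] == sensor2[:i] and sensor2[i:-1] == sensor1[i+1:] and sensor2[-1] != sensor1[i]
def condA2 (sensor1 : List Int) (sensor2 : List Int) (i : Int) : Bool :=
  decide (PySem.List.slice sensor1 none (some i) = PySem.List.slice sensor2 none (some i) ∧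
    PySem.List.slice sensor2 (some i) (some (-1)) = PySem.List.slice sensor1 (some (i + 1)) none ∧
    PySem.List.pyGetD sensor2 (-1) 0 ≠ PySem.List.pyGetD sensor1 i 0)

-- one iteration of A's loop: add 1 / add 2 to the 'valid' set when the conditions hold
def stepA (sensor1 : List Int) (sensor2 : List Int) (v : PySem.Set Int) (i : Int) : PySem.Set Int :=
  let v1 := if condA1 sensor1 sensor2 i then PySem.Set.add v 1 else v
  if condA2 sensor1 sensor2 i then PySem.Set.add v1 2 else v1

def badSensor (sensor1 : List Int) (sensor2 : List Int) : Int :=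
  let n : Int := sensor1.length
  let valid : PySem.Set Int :=
    (PySem.List.pyRange 0 n 1).foldl (stepA sensor1 sensor2) PySem.Set.empty
  if valid.length = 1 then valid.headD 0 else -1

-- ===== PORT B =====
-- while f < n and sensor1[f] == sensor2[f]: f += 1   (fuel = n - f)
def fmLoop (sensor1 : List Int) (sensor2 : List Int) : Nat → Nat → Nat
  | 0, f => f
  | fuel + 1, f =>
    if PySem.List.pyGetD sensor1 (f : Int) 0 = PySem.List.pyGetD sensor2 (f : Int) 0 then
      fmLoop sensor1 sensor2 fuel (f + 1)
    else f

def badSensor_alt (sensor1 : List Int) (sensor2 : List Int) : Int :=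
  let n : Nat := sensor1.length
  if sensor2.length ≠ n then -1
  else
  let f : Nat := fmLoop sensor1 sensor2 n 0
  if f = n then -1
  else
    let one : Bool := decide (PySem.List.slice sensor1 (some (f : Int)) (some ((n : Int) - 1)) = PySem.List.slice sensor2 (some ((f : Int) + 1)) none ∧
                              PySem.List.pyGetD sensor1 (-1) 0 ≠ PySem.List.pyGetD sensor2 (f : Int) 0)
    let two : Bool := decide (PySem.List.slice sensor2 (some (f : Int)) (some ((n : Int) - 1)) = PySem.List.slice sensor1 (some ((f : Int) + 1)) none ∧
                              PySem.List.pyGetD sensor2 (-1) 0 ≠ PySem.List.pyGetD sensor1 (f : Int) 0)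
    if one ≠ two then (if one then 1 else 2) else -1

-- ===== PRECONDITION & SPEC =====
-- Pre_ excludes exactly the inputs on which A raises IndexError (sensor2[i] with
-- i = len(sensor2) is reached exactly when sensor2 is one element shorter than sensor1
-- and equals sensor1 without its last element); A returns normally everywhere else.
def Pre_badSensor (sensor1 : List Int) (sensor2 : List Int) : Prop :=
  ¬(sensor2.length + 1 = sensor1.length ∧ sensor1.take (sensor1.length - 1) = sensor2)
instance (sensor1 : List Int) (sensor2 : List Int) : Decidable (Pre_badSensor sensor1 sensor2) := by
  unfold Pre_badSensor; infer_instance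

def pvWitness_badSensor : List Int × List Int := ([2, 1, 3, 4], [2, 1, 5, 3])

def Spec_badSensor (sensor1 : List Int) (sensor2 : List Int) (out : Int) : Prop := out = badSensor_alt sensor1 sensor2
instance (sensor1 : List Int) (sensor2 : List Int) (out : Int) : Decidable (Spec_badSensor sensor1 sensor2 out) := by unfold Spec_badSensor; infer_instance

-- ===== CLAIM (what is proved, stated in full; the proofs are below) =====
def Claim_equal_badSensor : Prop := ∀ (sensor1 : List Int) (sensor2 : List Int), Dom_badSensor sensor1 sensor2 → Pre_badSensor sensor1 sensor2 → Spec_badSensor sensor1 sensor2 (badSensor sensor1 sensor2)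

-- ===== LEMMAS AND PROOFS =====

def pfx : List Int → List Int → Nat
  | a :: as, b :: bs => if a = b then pfx as bs + 1 else 0
  | _, _ => 0

lemma pfx_comm (x y : List Int) : pfx x y = pfx y x := by
  induction x generalizing y with
  | nil => cases y <;> simp [pfx]
  | cons a as ih => cases y with
    | nil => simp [pfx]
    | cons b bs =>
      simp only [pfx]
      by_cases hab : a = b
      · simp [hab, ih]
      · rw [if_neg hab, if_neg (fun h => hab h.symm)]

lemma pfx_le_left (x y : List Int) : pfx x y ≤ x.length := by
  induction x generalizing y with
  | nil => cases y <;> simp [pfx]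
  | cons a as ih => cases y with
    | nil => simp [pfx]
    | cons b bs =>
      simp only [pfx]
      split
      · have := ih (y := bs); simp only [List.length_cons]; omega
      · simp

lemma getD_eq_of_lt_pfx (x y : List Int) {j : Nat} (h : j < pfx x y) : x.getD j 0 = y.getD j 0 := by
  induction x generalizing y j with
  | nil => cases y <;> simp [pfx] at h
  | cons a as ih => cases y with
    | nil => simp [pfx] at h
    | cons b bs =>
      simp only [pfx] at h
      split at h
      · cases j with
        | zero => simpa using ‹a = b›
        | succ j => simpa using ih (y := bs) (by omega)
      · omega

lemma take_eq_of_le_pfx (x y : List Int) {k : Nat} (h : k ≤ pfx x y) : x.take k = y.take k := by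
  induction x generalizing y k with
  | nil => cases y <;> simp [pfx] at h <;> simp [h]
  | cons a as ih => cases y with
    | nil => simp [pfx] at h; simp [h]
    | cons b bs =>
      simp only [pfx] at h
      split at h
      · cases k with
        | zero => simp
        | succ k => simp only [List.take_succ_cons, ‹a = b›, List.cons.injEq, true_and]; exact ih (y := bs) (by omega)
      · interval_cases k; simp

lemma le_pfx_of_take_eq (x y : List Int) {k : Nat} (hk : k ≤ x.length) (hk' : k ≤ y.length)
    (h : x.take k = y.take k) : k ≤ pfx x y := by
  induction x generalizing y k with
  | nil => simp at hk; omega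
  | cons a as ih => cases y with
    | nil => simp at hk'; omega
    | cons b bs =>
      cases k with
      | zero => omega
      | succ k =>
        simp only [List.take_succ_cons, List.cons.injEq] at h
        simp only [pfx, h.1, if_true]
        have := ih (y := bs) (by simpa using hk) (by simpa using hk') h.2
        omega

def Cm (x y : List Int) (k : Nat) : Prop := (x.drop k).take (x.length - 1 - k) = y.drop (k + 1)
def Cl (x y : List Int) (k : Nat) : Prop := x.getD (x.length - 1) 0 ≠ y.getD k 0

lemma slice_nat_neg_one (xs : List Int) (k : Nat) :
    PySem.List.slice xs (some (k : Int)) (some (-1)) = (xs.drop k).take (xs.length - 1 - k) := by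
  simp only [PySem.List.slice, PySem.List.clampIdx]
  rw [if_pos (by omega : (-1 : Int) < 0), if_neg (by omega : ¬ ((k : Int) < 0))]
  have h2 : (if (xs.length : Int) + -1 < 0 then 0 else ((xs.length : Int) + -1).toNat) = xs.length - 1 := by
    split <;> omega
  rw [h2]
  by_cases hk : k ≤ xs.length
  · rw [min_eq_left (by omega), Int.toNat_natCast]
  · rw [Int.toNat_natCast, min_eq_right (by omega), List.drop_length, List.drop_eq_nil_of_le (by omega)]
    simp

lemma fmLoop_eq_pfx (x y : List Int) (hl : x.length = y.length) :
    ∀ (fuel f : Nat), f + fuel = x.length → fmLoop x y fuel f = f + pfx (x.drop f) (y.drop f) := by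
  intro fuel
  induction fuel with
  | zero =>
    intro f hf
    rw [fmLoop, List.drop_eq_nil_of_le (by omega), List.drop_eq_nil_of_le (by omega)]
    simp [pfx]
  | succ fuel ih =>
    intro f hf
    have hfx : f < x.length := by omega
    have hfy : f < y.length := by omega
    have hdx : x.drop f = x[f] :: x.drop (f + 1) := (List.getElem_cons_drop hfx).symm
    have hdy : y.drop f = y[f] :: y.drop (f + 1) := (List.getElem_cons_drop hfy).symm
    rw [fmLoop]
    simp only [PySem.List.pyGetD_natCast, List.getD_eq_getElem x 0 hfx, List.getD_eq_getElem y 0 hfy]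
    rw [hdx, hdy]
    simp only [pfx]
    split
    · rw [ih (f + 1) (by omega)]; omega
    · rfl

lemma prop_step (x y : List Int) (hl : x.length = y.length) {k : Nat} (hk : k < pfx x y)
    (hc : Cm x y k ∧ Cl x y k) : Cm x y (k + 1) ∧ Cl x y (k + 1) := by
  obtain ⟨hm, hle⟩ := hc
  have hF := pfx_le_left x y
  have hkn : k < x.length := by omega
  have heqk := getD_eq_of_lt_pfx x y hk
  by_cases hk1 : k + 1 = x.length
  · exfalso
    apply hle
    rw [show x.length - 1 = k by omega, heqk]
  · have hk1n : k + 1 < x.length := by omega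
    have hdx : x.drop k = x[k] :: x.drop (k + 1) := (List.getElem_cons_drop hkn).symm
    have hdy : y.drop (k + 1) = y[k + 1]'(by omega) :: y.drop (k + 2) := (List.getElem_cons_drop (by omega)).symm
    unfold Cm at hm
    rw [hdx, hdy, show x.length - 1 - k = (x.length - 1 - (k + 1)) + 1 by omega, List.take_succ_cons,
      List.cons.injEq] at hm
    obtain ⟨hhead, htail⟩ := hm
    constructor
    · exact htail
    · unfold Cl
      rw [List.getD_eq_getElem y 0 (by omega : k + 1 < y.length), ← hhead,
        ← List.getD_eq_getElem x 0 hkn, heqk]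
      intro hcon
      exact hle (by rw [hcon])

lemma prop_up (x y : List Int) (hl : x.length = y.length) {k d : Nat} (hkd : k + d ≤ pfx x y)
    (hc : Cm x y k ∧ Cl x y k) : Cm x y (k + d) ∧ Cl x y (k + d) := by
  induction d with
  | zero => exact hc
  | succ d ih =>
    have h1 := ih (by omega)
    have := prop_step x y hl (k := k + d) (by omega) h1
    simpa [Nat.add_assoc] using this

lemma exists_iff (x y : List Int) (hl : x.length = y.length) :
    (∃ k, k < x.length ∧ x.take k = y.take k ∧ Cm x y k ∧ Cl x y k) ↔
      (pfx x y < x.length ∧ Cm x y (pfx x y) ∧ Cl x y (pfx x y)) := by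
  constructor
  · rintro ⟨k, hk, ht, hc⟩
    have hkF : k ≤ pfx x y := le_pfx_of_take_eq x y (by omega) (by omega) ht
    have hF := pfx_le_left x y
    by_cases hFn : pfx x y < x.length
    · refine ⟨hFn, ?_⟩
      have := prop_up x y hl (k := k) (d := pfx x y - k) (by omega) hc
      rwa [show k + (pfx x y - k) = pfx x y by omega] at this
    · exfalso
      have hF_eq : pfx x y = x.length := by omega
      have := prop_up x y hl (k := k) (d := (x.length - 1) - k) (by omega) hc
      rw [show k + (x.length - 1 - k) = x.length - 1 by omega] at this
      exact this.2 (getD_eq_of_lt_pfx x y (by omega))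
  · rintro ⟨hF, hc⟩
    exact ⟨pfx x y, hF, take_eq_of_le_pfx x y le_rfl, hc⟩

lemma condA1_iff (s1 s2 : List Int) (hl : s1.length = s2.length) {k : Nat} (hk : k < s1.length) :
    condA1 s1 s2 (k : Int) = true ↔ (s1.take k = s2.take k ∧ Cm s1 s2 k ∧ Cl s1 s2 k) := by
  unfold condA1
  rw [decide_eq_true_iff]
  rw [PySem.List.slice_to_natCast, PySem.List.slice_to_natCast, slice_nat_neg_one,
    show ((k : Int) + 1) = ((k + 1 : Nat) : Int) by push_cast; ring,
    PySem.List.slice_from_natCast,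
    show (-1 : Int) = -((1 : Nat) : Int) by norm_num,
    PySem.List.pyGetD_neg_natCast s1 1 0 (by omega) (by omega),
    PySem.List.pyGetD_natCast,
    ← List.getD_eq_getElem s1 0 (by omega : s1.length - 1 < s1.length)]
  exact Iff.rfl

lemma condA2_iff (s1 s2 : List Int) (hl : s1.length = s2.length) {k : Nat} (hk : k < s1.length) :
    condA2 s1 s2 (k : Int) = true ↔ (s1.take k = s2.take k ∧ Cm s2 s1 k ∧ Cl s2 s1 k) := by
  unfold condA2
  rw [decide_eq_true_iff]
  rw [PySem.List.slice_to_natCast, PySem.List.slice_to_natCast, slice_nat_neg_one,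
    show ((k : Int) + 1) = ((k + 1 : Nat) : Int) by push_cast; ring,
    PySem.List.slice_from_natCast,
    show (-1 : Int) = -((1 : Nat) : Int) by norm_num,
    PySem.List.pyGetD_neg_natCast s2 1 0 (by omega) (by omega),
    PySem.List.pyGetD_natCast,
    ← List.getD_eq_getElem s2 0 (by omega : s2.length - 1 < s2.length)]
  exact Iff.rfl

lemma mem_one_foldl_stepA (s1 s2 : List Int) (l : List Int) (v : PySem.Set Int) :
    (1 : Int) ∈ l.foldl (stepA s1 s2) v ↔ (1 : Int) ∈ v ∨ ∃ i ∈ l, condA1 s1 s2 i = true := by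
  induction l generalizing v with
  | nil => simp
  | cons i l ih =>
    rw [List.foldl_cons, ih]
    have hstep : ((1 : Int) ∈ stepA s1 s2 v i) ↔ ((1 : Int) ∈ v ∨ condA1 s1 s2 i = true) := by
      unfold stepA
      split <;> split <;> simp_all [PySem.Set.mem_add]
    rw [hstep]
    simp only [List.mem_cons]
    constructor
    · rintro (⟨h | h⟩ | ⟨j, hj, hc⟩)
      · exact Or.inl h
      · exact Or.inr ⟨i, Or.inl rfl, h⟩
      · exact Or.inr ⟨j, Or.inr hj, hc⟩
    · rintro (h | ⟨j, (rfl | hj), hc⟩)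
      · exact Or.inl (Or.inl h)
      · exact Or.inl (Or.inr hc)
      · exact Or.inr ⟨j, hj, hc⟩

lemma mem_two_foldl_stepA (s1 s2 : List Int) (l : List Int) (v : PySem.Set Int) :
    (2 : Int) ∈ l.foldl (stepA s1 s2) v ↔ (2 : Int) ∈ v ∨ ∃ i ∈ l, condA2 s1 s2 i = true := by
  induction l generalizing v with
  | nil => simp
  | cons i l ih =>
    rw [List.foldl_cons, ih]
    have hstep : ((2 : Int) ∈ stepA s1 s2 v i) ↔ ((2 : Int) ∈ v ∨ condA2 s1 s2 i = true) := by
      unfold stepA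
      split <;> split <;> simp_all [PySem.Set.mem_add]
    rw [hstep]
    simp only [List.mem_cons]
    constructor
    · rintro (⟨h | h⟩ | ⟨j, hj, hc⟩)
      · exact Or.inl h
      · exact Or.inr ⟨i, Or.inl rfl, h⟩
      · exact Or.inr ⟨j, Or.inr hj, hc⟩
    · rintro (h | ⟨j, (rfl | hj), hc⟩)
      · exact Or.inl (Or.inl h)
      · exact Or.inl (Or.inr hc)
      · exact Or.inr ⟨j, hj, hc⟩

lemma nodup_foldl_stepA (s1 s2 : List Int) (l : List Int) (v : PySem.Set Int) (hv : v.Nodup) :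
    (l.foldl (stepA s1 s2) v).Nodup := by
  induction l generalizing v with
  | nil => exact hv
  | cons i l ih =>
    rw [List.foldl_cons]
    apply ih
    unfold stepA
    split <;> split <;> first
      | exact PySem.Set.nodup_add _ _ (PySem.Set.nodup_add _ _ hv)
      | exact PySem.Set.nodup_add _ _ hv
      | exact hv

lemma subset_foldl_stepA (s1 s2 : List Int) (l : List Int) (v : PySem.Set Int)
    (hv : ∀ x ∈ v, x = (1 : Int) ∨ x = 2) : ∀ x ∈ l.foldl (stepA s1 s2) v, x = (1 : Int) ∨ x = 2 := by
  induction l generalizing v with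
  | nil => exact hv
  | cons i l ih =>
    rw [List.foldl_cons]
    apply ih
    have hadd : ∀ (w : PySem.Set Int) (y : Int), (∀ z ∈ w, z = (1 : Int) ∨ z = 2) →
        (y = (1 : Int) ∨ y = 2) → ∀ z ∈ PySem.Set.add w y, z = (1 : Int) ∨ z = 2 := by
      intro w y hw hy z hz
      rcases (PySem.Set.mem_add w y z).mp hz with h | h
      · exact hw z h
      · rw [h]; exact hy
    unfold stepA
    split <;> split
    · exact hadd _ _ (hadd _ _ hv (Or.inl rfl)) (Or.inr rfl)
    · exact hadd _ _ hv (Or.inl rfl)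
    · exact hadd _ _ hv (Or.inr rfl)
    · exact hv

-- a Nodup list over {a, b} containing a but not b is [a]
lemma eq_single (S : List Int) (a b : Int) (hnd : S.Nodup) (hsub : ∀ x ∈ S, x = a ∨ x = b)
    (ha : a ∈ S) (hb : b ∉ S) : S = [a] := by
  have hall : ∀ x ∈ S, x = a := fun x hx => (hsub x hx).resolve_right (fun h => hb (h ▸ hx))
  cases S with
  | nil => cases ha
  | cons c t =>
    have hc : c = a := hall c (List.mem_cons_self)
    cases t with
    | nil => rw [hc]
    | cons d t2 =>
      exfalso
      have hd : d = a := hall d (by simp)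
      rw [List.nodup_cons] at hnd
      exact hnd.1 (by simp [hc, hd])

-- B's per-sensor checks at the first mismatch index, rewritten to Cm/Cl
lemma oneB_iff (x y : List Int) (hl : x.length = y.length) {F : Nat} (hF : F < x.length) :
    (PySem.List.slice x (some (F : Int)) (some ((x.length : Int) - 1)) =
        PySem.List.slice y (some ((F : Int) + 1)) none ∧
      PySem.List.pyGetD x (-1) 0 ≠ PySem.List.pyGetD y (F : Int) 0) ↔ (Cm x y F ∧ Cl x y F) := by
  rw [show ((x.length : Int) - 1) = ((x.length - 1 : Nat) : Int) by omega,
    PySem.List.slice_natCast,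
    show ((F : Int) + 1) = ((F + 1 : Nat) : Int) by push_cast; ring,
    PySem.List.slice_from_natCast,
    show (-1 : Int) = -((1 : Nat) : Int) by norm_num,
    PySem.List.pyGetD_neg_natCast x 1 0 (by omega) (by omega),
    PySem.List.pyGetD_natCast,
    ← List.getD_eq_getElem x 0 (by omega : x.length - 1 < x.length)]
  exact Iff.rfl

-- membership in A's 'valid' set, as the first-mismatch characterisation
lemma mem_valid_iff (s1 s2 : List Int) (hl : s1.length = s2.length)
    (c : List Int → List Int → Int → Bool)
    (hc : ∀ k : Nat, k < s1.length →
      (c s1 s2 (k : Int) = true ↔ (s1.take k = s2.take k ∧ Cm s1 s2 k ∧ Cl s1 s2 k))) :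
    (∃ i ∈ PySem.List.pyRange 0 (s1.length : Int) 1, c s1 s2 i = true) ↔
      (pfx s1 s2 < s1.length ∧ Cm s1 s2 (pfx s1 s2) ∧ Cl s1 s2 (pfx s1 s2)) := by
  rw [← exists_iff s1 s2 hl]
  constructor
  · rintro ⟨i, hi, hci⟩
    rw [PySem.List.mem_pyRange_one] at hi
    obtain ⟨h0, hn⟩ := hi
    have hik : i = ((i.toNat : Nat) : Int) := by omega
    have hk : i.toNat < s1.length := by omega
    rw [hik] at hci
    exact ⟨i.toNat, hk, (hc i.toNat hk).mp hci⟩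
  · rintro ⟨k, hk, h⟩
    exact ⟨(k : Int), PySem.List.mem_pyRange_one.mpr (by omega), (hc k hk).mpr h⟩

-- ===== VERDICT (by name: the statement is the Claim_ definition above) =====
-- the slice parts of A's conditions, unfolded (no length assumption)
lemma condA1_parts {s1 s2 : List Int} {k : Nat} (h : condA1 s1 s2 (k : Int) = true) :
    s1.take k = s2.take k ∧ (s1.drop k).take (s1.length - 1 - k) = s2.drop (k + 1) := by
  unfold condA1 at h
  rw [decide_eq_true_iff] at h
  obtain ⟨h1, h2, _⟩ := h
  rw [PySem.List.slice_to_natCast, PySem.List.slice_to_natCast] at h1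
  rw [slice_nat_neg_one, show ((k : Int) + 1) = ((k + 1 : Nat) : Int) by push_cast; ring,
    PySem.List.slice_from_natCast] at h2
  exact ⟨h1, h2⟩

lemma condA2_parts {s1 s2 : List Int} {k : Nat} (h : condA2 s1 s2 (k : Int) = true) :
    s1.take k = s2.take k ∧ (s2.drop k).take (s2.length - 1 - k) = s1.drop (k + 1) := by
  unfold condA2 at h
  rw [decide_eq_true_iff] at h
  obtain ⟨h1, h2, _⟩ := h
  rw [PySem.List.slice_to_natCast, PySem.List.slice_to_natCast] at h1
  rw [slice_nat_neg_one, show ((k : Int) + 1) = ((k + 1 : Nat) : Int) by push_cast; ring,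
    PySem.List.slice_from_natCast] at h2
  exact ⟨h1, h2⟩

-- with unequal lengths, inside Pre_ neither of A's conditions can hold at any index
lemma no_cond_of_ne_len {s1 s2 : List Int} (hm : s2.length ≠ s1.length)
    (hpre : ¬(s2.length + 1 = s1.length ∧ s1.take (s1.length - 1) = s2)) {k : Nat}
    (hk : k < s1.length)
    (hab : (s1.take k = s2.take k ∧ (s1.drop k).take (s1.length - 1 - k) = s2.drop (k + 1)) ∨
           (s1.take k = s2.take k ∧ (s2.drop k).take (s2.length - 1 - k) = s1.drop (k + 1))) :
    False := by
  have key : s2.length + 1 = s1.length ∧ k = s1.length - 1 := by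
    rcases hab with ⟨ha, hb⟩ | ⟨ha, hb⟩ <;>
    · have la := congrArg List.length ha
      have lb := congrArg List.length hb
      simp only [List.length_take, List.length_drop] at la lb
      omega
  rcases hab with ⟨ha, _⟩ | ⟨ha, _⟩ <;>
  · rw [key.2] at ha
    rw [List.take_of_length_le (by omega : s2.length ≤ s1.length - 1)] at ha
    exact hpre ⟨key.1, ha⟩

theorem badSensor_spec : Claim_equal_badSensor := by
  intro s1 s2 _ hpre0
  unfold Pre_badSensor at hpre0
  unfold Spec_badSensor
  simp only [badSensor, badSensor_alt]
  by_cases hl : s2.length = s1.length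
  case neg =>
    rw [if_pos hl]
    have hSempty : (PySem.List.pyRange 0 (s1.length : Int) 1).foldl (stepA s1 s2) PySem.Set.empty
        = [] := by
      apply List.eq_nil_iff_forall_not_mem.mpr
      intro x hx
      rcases subset_foldl_stepA s1 s2 _ _ (by simp [PySem.Set.empty]) x hx with rfl | rfl
      · obtain ⟨i, hi, hci⟩ := ((mem_one_foldl_stepA s1 s2 _ _).mp hx).resolve_left
          (by simp [PySem.Set.empty])
        rw [PySem.List.mem_pyRange_one] at hi
        rw [show i = ((i.toNat : Nat) : Int) by omega] at hci
        exact no_cond_of_ne_len hl hpre0 (by omega : i.toNat < s1.length)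
          (Or.inl (condA1_parts hci))
      · obtain ⟨i, hi, hci⟩ := ((mem_two_foldl_stepA s1 s2 _ _).mp hx).resolve_left
          (by simp [PySem.Set.empty])
        rw [PySem.List.mem_pyRange_one] at hi
        rw [show i = ((i.toNat : Nat) : Int) by omega] at hci
        exact no_cond_of_ne_len hl hpre0 (by omega : i.toNat < s1.length)
          (Or.inr (condA2_parts hci))
    rw [hSempty]
    simp
  case pos =>
  rw [if_neg (show ¬ s2.length ≠ s1.length from fun h => h hl)]
  have hpre : s1.length = s2.length := hl.symm
  have hfm : fmLoop s1 s2 s1.length 0 = pfx s1 s2 := by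
    have := fmLoop_eq_pfx s1 s2 hpre s1.length 0 (by omega)
    simpa using this
  rw [hfm]
  set F := pfx s1 s2 with hFdef
  set S := (PySem.List.pyRange 0 (s1.length : Int) 1).foldl (stepA s1 s2) PySem.Set.empty with hS
  have h1 : ((1 : Int) ∈ S) ↔ (F < s1.length ∧ Cm s1 s2 F ∧ Cl s1 s2 F) := by
    rw [hS, mem_one_foldl_stepA]
    rw [mem_valid_iff s1 s2 hpre condA1 (fun k hk => condA1_iff s1 s2 hpre hk)]
    tauto
  have h2'' : (∃ i ∈ PySem.List.pyRange 0 (s1.length : Int) 1, condA2 s1 s2 i = true) ↔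
      (pfx s2 s1 < s2.length ∧ Cm s2 s1 (pfx s2 s1) ∧ Cl s2 s1 (pfx s2 s1)) := by
    rw [← exists_iff s2 s1 hpre.symm]
    constructor
    · rintro ⟨i, hi, hci⟩
      rw [PySem.List.mem_pyRange_one] at hi
      have hik : i = ((i.toNat : Nat) : Int) := by omega
      have hk : i.toNat < s1.length := by omega
      rw [hik] at hci
      obtain ⟨ht, hc⟩ := (condA2_iff s1 s2 hpre hk).mp hci
      exact ⟨i.toNat, by omega, ht.symm, hc⟩
    · rintro ⟨k, hk, ht, hc⟩
      refine ⟨(k : Int), PySem.List.mem_pyRange_one.mpr (by omega), ?_⟩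
      exact (condA2_iff s1 s2 hpre (by omega)).mpr ⟨ht.symm, hc⟩
  have h2' : (∃ i ∈ PySem.List.pyRange 0 (s1.length : Int) 1, condA2 s1 s2 i = true) ↔
      (F < s1.length ∧ Cm s2 s1 F ∧ Cl s2 s1 F) := by
    rw [h2'', pfx_comm s2 s1, ← hFdef, ← hpre]
  have h2 : ((2 : Int) ∈ S) ↔ (F < s1.length ∧ Cm s2 s1 F ∧ Cl s2 s1 F) := by
    rw [hS, mem_two_foldl_stepA, h2']
    tauto
  have hnd : S.Nodup := nodup_foldl_stepA s1 s2 _ _ (by simp [PySem.Set.empty])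
  have hsub : ∀ x ∈ S, x = (1 : Int) ∨ x = 2 :=
    subset_foldl_stepA s1 s2 _ _ (by simp [PySem.Set.empty])
  by_cases hFn : F = s1.length
  · rw [if_pos hFn]
    have hSempty : S = [] := by
      apply List.eq_nil_iff_forall_not_mem.mpr
      intro x hx
      rcases hsub x hx with rfl | rfl
      · exact absurd (h1.mp hx).1 (by omega)
      · exact absurd (h2.mp hx).1 (by omega)
    rw [hSempty]
    simp
  · rw [if_neg hFn]
    have hFlt : F < s1.length := lt_of_le_of_ne (hFdef ▸ pfx_le_left s1 s2) hFn
    have hone := oneB_iff s1 s2 hpre hFlt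
    have htwo' := oneB_iff s2 s1 hpre.symm (hpre ▸ hFlt : F < s2.length)
    rw [← hpre] at htwo'
    by_cases hP1 : Cm s1 s2 F ∧ Cl s1 s2 F <;> by_cases hP2 : Cm s2 s1 F ∧ Cl s2 s1 F
    · rw [decide_eq_true (hone.mpr hP1), decide_eq_true (htwo'.mpr hP2)]
      have hlen : S.length ≠ 1 := by
        intro h
        obtain ⟨x, hx⟩ := List.length_eq_one_iff.mp h
        have m1 : (1 : Int) ∈ S := h1.mpr ⟨hFlt, hP1⟩
        have m2 : (2 : Int) ∈ S := h2.mpr ⟨hFlt, hP2⟩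
        rw [hx] at m1 m2
        simp at m1 m2
        omega
      rw [if_neg hlen]
      simp
    · rw [decide_eq_true (hone.mpr hP1), decide_eq_false (fun h => hP2 (htwo'.mp h))]
      have hSone : S = [1] := eq_single S 1 2 hnd hsub (h1.mpr ⟨hFlt, hP1⟩)
        (fun h => hP2 (h2.mp h).2)
      rw [hSone]
      simp
    · rw [decide_eq_false (fun h => hP1 (hone.mp h)), decide_eq_true (htwo'.mpr hP2)]
      have hStwo : S = [2] := eq_single S 2 1 hnd (fun x hx => (hsub x hx).symm)
        (h2.mpr ⟨hFlt, hP2⟩) (fun h => hP1 (h1.mp h).2)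
      rw [hStwo]
      simp
    · rw [decide_eq_false (fun h => hP1 (hone.mp h)), decide_eq_false (fun h => hP2 (htwo'.mp h))]
      have hSempty : S = [] := by
        apply List.eq_nil_iff_forall_not_mem.mpr
        intro x hx
        rcases hsub x hx with rfl | rfl
        · exact hP1 (h1.mp hx).2
        · exact hP2 (h2.mp hx).2
      rw [hSempty]
      simp
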